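-- pv_equiv track=rewrite | github.com/ASSERT-KTH/Mokav | experiments/c4b/BATI/iteration-10-sample-10-temp-1/generated_tests/2742/11/temp_acc_qb.py | patched_func
-- ===== SOURCE A (Python) =====
-- def patched_func(*args):
-- 	global_list = []
--
-- 	n = int(args[0])
-- 	a = ''
-- 	if ((n % 2) and (n >= 3)):
-- 	    n -= 3
-- 	    a += '7'
-- 	while (n > 0):
-- 	    n -= 2
-- 	    a += '1'
-- 	global_list.append(a)
-- 	return global_list
-- ===== SOURCE B (Python) =====
-- def patched_func(*args):
--     n = int(args[0])
--     if n % 2 and n >= 3: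
--         return ['7' + '1' * ((n - 3) // 2)]
--     return ['1' * ((n + 1) // 2 if n > 0 else 0)]
-- ===== Notes on version B (the rewrite author's own statement) =====
-- stated objective: faster
-- what changed: Replaces the decrement-by-two while loop that builds the string one appended character at a time with a closed-form construction whose repeat count is computed arithmetically.
import Mathlib
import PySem

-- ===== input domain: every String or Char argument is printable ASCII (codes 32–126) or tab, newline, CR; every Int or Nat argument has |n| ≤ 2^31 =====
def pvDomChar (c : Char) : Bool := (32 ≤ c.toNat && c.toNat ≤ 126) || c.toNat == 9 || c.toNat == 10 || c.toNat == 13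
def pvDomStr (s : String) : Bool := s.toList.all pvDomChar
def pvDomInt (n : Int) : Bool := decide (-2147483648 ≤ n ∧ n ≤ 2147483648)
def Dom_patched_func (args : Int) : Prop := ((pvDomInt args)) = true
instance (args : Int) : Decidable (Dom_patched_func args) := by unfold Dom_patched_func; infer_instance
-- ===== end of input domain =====

-- B builds the result in closed form instead of A's decrement-by-2 appending loop (objective: simpler).

-- ===== PORT A =====
-- the `while (n > 0): n -= 2; a += '1'` loop
def patchedLoopA (n : Int) (a : String) : String :=
  if n > 0 then patchedLoopA (n - 2) (a ++ "1") else a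
termination_by n.toNat
decreasing_by simp; omega

def patched_func (args : Int) : List String :=
  let n : Int := args
  let a : String := ""
  let s : Int × String :=
    if PySem.Int.mod n 2 ≠ 0 ∧ n ≥ 3 then (n - 3, a ++ "7") else (n, a)
  [patchedLoopA s.1 s.2]

-- ===== PORT B =====
def patched_func_alt (args : Int) : List String :=
  let n : Int := args
  if PySem.Int.mod n 2 ≠ 0 ∧ n ≥ 3 then
    ["7" ++ String.ofList (List.replicate (PySem.Int.floordiv (n - 3) 2).toNat '1')]
  else
    [String.ofList (List.replicate (if n > 0 then (PySem.Int.floordiv (n + 1) 2).toNat else 0) '1')]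

-- ===== PRECONDITION & SPEC =====
def Spec_patched_func (args : Int) (out : List String) : Prop := out = patched_func_alt args
instance (args : Int) (out : List String) : Decidable (Spec_patched_func args out) := by unfold Spec_patched_func; infer_instance

-- ===== CLAIM (what is proved, stated in full; the proofs are below) =====
def Claim_equal_patched_func : Prop := ∀ (args : Int), Dom_patched_func args → Spec_patched_func args (patched_func args)

-- ===== LEMMAS AND PROOFS =====
theorem patchedLoopA_eq (n : Int) (a : String) :
    patchedLoopA n a = a ++ String.ofList (List.replicate ((n.toNat + 1) / 2) '1') := by
  induction n, a using patchedLoopA.induct with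
  | case1 n a h ih =>
      rw [patchedLoopA, if_pos h, ih]
      have hc : (n.toNat + 1) / 2 = ((n - 2).toNat + 1) / 2 + 1 := by omega
      rw [hc, List.replicate_succ]
      have h1 : ("1" : String) = String.ofList ['1'] := rfl
      rw [h1, String.append_assoc, ← String.ofList_append]
      simp
  | case2 n a h =>
      rw [patchedLoopA, if_neg h]
      have : n.toNat = 0 := by omega
      simp [this]

theorem patched_func_spec : Claim_equal_patched_func := by
  intro n _
  unfold Spec_patched_func patched_func patched_func_alt
  dsimp only
  split_ifs with h hp
  · rw [patchedLoopA_eq]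
    obtain ⟨hm, h3⟩ := h
    rw [PySem.Int.mod_eq_emod_of_pos (by omega)] at hm
    rw [PySem.Int.floordiv_eq_ediv_of_pos (by omega)]
    have hc : ((n - 3).toNat + 1) / 2 = ((n - 3) / 2).toNat := by omega
    simp [hc]
  · rw [patchedLoopA_eq, PySem.Int.floordiv_eq_ediv_of_pos (by omega)]
    have hc : (n.toNat + 1) / 2 = ((n + 1) / 2).toNat := by omega
    simp [hc]
  · rw [patchedLoopA_eq]
    have h0 : n.toNat = 0 := by omega
    simp [h0]
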